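-- pv_equiv track=rewrite | github.com/hmorris94/Mubi-1000 | app/blueprint.py | get_all_title_variants
-- ===== SOURCE A (Python) =====
-- ALTERNATE_TITLES = {
--     "dr strangelove": [
--         "dr strangelove or how i learned to stop worrying and love the bomb"
--     ],
-- }
--
-- def get_all_title_variants(normalized_title):
--     variants = {normalized_title}
--     if normalized_title in ALTERNATE_TITLES:
--         variants.update(ALTERNATE_TITLES[normalized_title])
--     for primary, alternates in ALTERNATE_TITLES.items():
--         if normalized_title in alternates:
--             variants.add(primary)
--             variants.update(alternates)
--     return variants
-- ===== SOURCE B (Python) =====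
-- ALTERNATE_TITLES = {
--     "dr strangelove": [
--         "dr strangelove or how i learned to stop worrying and love the bomb"
--     ],
-- }
--
-- # Reverse index built once at module load: every member of a title group maps to the whole group.
-- REVERSE = {}
-- for _primary, _alternates in ALTERNATE_TITLES.items():
--     _group = {_primary}
--     _group.update(_alternates)
--     for _member in [_primary] + _alternates:
--         REVERSE[_member] = _group
--
-- def get_all_title_variants(normalized_title):
--     return {normalized_title} | REVERSE.get(normalized_title, set())
-- ===== Notes on version B (the rewrite author's own statement) =====
-- stated objective: alternative
-- what changed: B precomputes at module load a reverse index mapping every title in a group to the full variant group, so the function becomes a single dict lookup unioned with {normalized_title}, eliminating A's membership check plus full scan over ALTERNATE_TITLES.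
import Mathlib
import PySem

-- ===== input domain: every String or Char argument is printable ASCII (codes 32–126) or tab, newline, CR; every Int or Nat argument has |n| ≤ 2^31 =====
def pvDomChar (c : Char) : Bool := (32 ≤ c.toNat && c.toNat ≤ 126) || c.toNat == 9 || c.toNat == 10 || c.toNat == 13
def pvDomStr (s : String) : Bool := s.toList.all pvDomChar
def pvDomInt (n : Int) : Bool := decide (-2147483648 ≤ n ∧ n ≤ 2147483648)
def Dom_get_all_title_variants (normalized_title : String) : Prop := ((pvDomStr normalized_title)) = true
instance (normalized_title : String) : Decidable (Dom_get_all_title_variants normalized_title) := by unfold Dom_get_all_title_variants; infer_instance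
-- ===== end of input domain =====

-- B replaces A's per-call membership check and full dict scan with a one-time reverse index and a single lookup (alternative decomposition; not claimed faster).

-- shared module constant ALTERNATE_TITLES
def altTitles : PySem.Dict String (List String) :=
  PySem.Dict.ofList [("dr strangelove", ["dr strangelove or how i learned to stop worrying and love the bomb"])]

-- ===== PORT A =====
def get_all_title_variants (normalized_title : String) : PySem.Set String :=
  let variants : PySem.Set String := PySem.Set.ofList [normalized_title]
  let variants := if altTitles.contains normalized_title then
      PySem.Set.update variants (altTitles.getD normalized_title []) else variants
  altTitles.items.foldl (fun v pa =>
    if pa.2.contains normalized_title then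
      PySem.Set.update (PySem.Set.add v pa.1) pa.2
    else v) variants

-- ===== PORT B =====
-- REVERSE index built at module load, exactly as in Source B
def reverseIdx : PySem.Dict String (PySem.Set String) :=
  altTitles.items.foldl (fun d pa =>
    let group := PySem.Set.update (PySem.Set.ofList [pa.1]) pa.2
    ([pa.1] ++ pa.2).foldl (fun d m => d.insert m group) d) PySem.Dict.empty

def get_all_title_variants_alt (normalized_title : String) : PySem.Set String :=
  PySem.Set.union (PySem.Set.ofList [normalized_title]) (reverseIdx.getD normalized_title PySem.Set.empty)

-- ===== PRECONDITION & SPEC =====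
def Spec_get_all_title_variants (normalized_title : String) (out : List String) : Prop := out = get_all_title_variants_alt normalized_title
instance (normalized_title : String) (out : List String) : Decidable (Spec_get_all_title_variants normalized_title out) := by unfold Spec_get_all_title_variants; infer_instance

-- ===== CLAIM (what is proved, stated in full; the proofs are below) =====
def Claim_equal_get_all_title_variants : Prop := ∀ (normalized_title : String), Dom_get_all_title_variants normalized_title → Spec_get_all_title_variants normalized_title (get_all_title_variants normalized_title)

-- ===== LEMMAS AND PROOFS =====

-- ===== VERDICT (by name: the statement is the Claim_ definition above) =====
theorem get_all_title_variants_spec : Claim_equal_get_all_title_variants := by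
  intro t _
  show get_all_title_variants t = get_all_title_variants_alt t
  by_cases h1 : t = "dr strangelove"
  · subst h1; decide
  by_cases h2 : t = "dr strangelove or how i learned to stop worrying and love the bomb"
  · subst h2; decide
  · simp [get_all_title_variants, get_all_title_variants_alt, altTitles, reverseIdx,
      PySem.Dict.ofList, PySem.Dict.empty, PySem.Dict.update, PySem.Dict.insert,
      PySem.Dict.contains, PySem.Dict.getD, PySem.Dict.get?,
      PySem.Set.ofList, PySem.Set.empty, PySem.Set.update, PySem.Set.union, PySem.Set.add,
      PySem.Set.contains, Ne.symm h1, Ne.symm h2, h2]
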